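-- pv_equiv track=rewrite | github.com/adrianschlatter/ppf.datamatrix | tests/common.py | msgs_from_alphabet
-- ===== SOURCE A (Python) =====
-- def msgs_from_alphabet(alphabet):
--     """
--     Creates test messages from alphabet
--
--     Number of messages yielded is equal to length of alphabet. Length of
--     messages varies from 0 to length of alphabet.
--     """
--     for i in range(len(alphabet)):
--         if 2 * i > len(alphabet):
--             msg = (alphabet[i:] +
--                    alphabet[:2 * i - len(alphabet)])
--         else:
--             msg = alphabet[i:2 * i]
--
--         yield msg
-- ===== SOURCE B (Python) =====
-- def msgs_from_alphabet(alphabet):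
--     """Incremental sliding window: each message comes from the previous one by
--     appending the next two wrapped characters and dropping the first."""
--     n = len(alphabet)
--     msg = alphabet[:0]
--     for i in range(n):
--         yield msg
--         j = (2 * i) % n
--         k = (2 * i + 1) % n
--         msg = (msg + alphabet[j:j + 1] + alphabet[k:k + 1])[1:]
-- ===== Notes on version B (the rewrite author's own statement) =====
-- stated objective: alternative
-- what changed: B is an incremental sliding-window generator: it keeps the current message as an accumulator and derives each next message from the previous one by appending the two next wrapped characters and dropping the first, instead of A's per-index slice-and-concatenate with a wrap-around branch.
import Mathlib
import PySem

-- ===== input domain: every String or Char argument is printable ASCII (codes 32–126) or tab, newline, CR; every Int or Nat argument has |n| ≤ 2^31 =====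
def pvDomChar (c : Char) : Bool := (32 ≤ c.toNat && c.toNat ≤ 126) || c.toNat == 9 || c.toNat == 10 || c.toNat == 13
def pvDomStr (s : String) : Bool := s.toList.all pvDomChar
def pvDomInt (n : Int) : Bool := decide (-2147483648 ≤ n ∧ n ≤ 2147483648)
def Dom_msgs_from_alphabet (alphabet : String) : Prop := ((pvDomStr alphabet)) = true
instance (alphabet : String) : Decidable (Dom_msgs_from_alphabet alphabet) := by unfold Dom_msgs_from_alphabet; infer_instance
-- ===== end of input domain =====

-- B replaces A's per-index wrap-around slicing by an incremental sliding window: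
-- each message is obtained from the previous one by appending the next two wrapped
-- characters and dropping the first (objective: alternative).


-- ===== PORT A =====
def msgs_from_alphabet (alphabet : String) : List String :=
  (PySem.List.pyRange 0 (alphabet.toList.length : Int) 1).map (fun i =>
    if 2 * i > (alphabet.toList.length : Int) then
      String.ofList (PySem.List.slice alphabet.toList (some i) none ++
                     PySem.List.slice alphabet.toList none
                       (some (2 * i - (alphabet.toList.length : Int))))
    else
      String.ofList (PySem.List.slice alphabet.toList (some i) (some (2 * i))))

-- ===== PORT B =====
-- the loop body of Source B: emit the current message, then slide the window
def stepB (cs : List Char) (n : Int) (acc : List String × List Char) (i : Int) :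
    List String × List Char :=
  let j := PySem.Int.mod (2 * i) n
  let k := PySem.Int.mod (2 * i + 1) n
  (acc.1 ++ [String.ofList acc.2],
   PySem.List.slice (acc.2 ++ PySem.List.slice cs (some j) (some (j + 1))
                           ++ PySem.List.slice cs (some k) (some (k + 1)))
                    (some 1) none)

def msgs_from_alphabet_alt (alphabet : String) : List String :=
  ((PySem.List.pyRange 0 (alphabet.toList.length : Int) 1).foldl
     (stepB alphabet.toList (alphabet.toList.length : Int))
     ([], PySem.List.slice alphabet.toList none (some 0))).1

-- ===== PRECONDITION & SPEC =====
def Spec_msgs_from_alphabet (alphabet : String) (out : List String) : Prop :=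
  out = msgs_from_alphabet_alt alphabet
instance (alphabet : String) (out : List String) : Decidable (Spec_msgs_from_alphabet alphabet out) := by
  unfold Spec_msgs_from_alphabet; infer_instance

-- ===== CLAIM =====
def Claim_equal_msgs_from_alphabet : Prop :=
  ∀ (alphabet : String), Dom_msgs_from_alphabet alphabet →
    Spec_msgs_from_alphabet alphabet (msgs_from_alphabet alphabet)

-- ===== LEMMAS AND PROOFS =====

-- canonical form of message k: the wrap-around window of length k starting at k
def canon (cs : List Char) (m : Nat) : List Char := (cs.drop m ++ cs).take m

lemma msgA_eq_canon (cs : List Char) (k : Nat) (hk : k < cs.length) :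
    (if 2 * (k:Int) > (cs.length:Int) then
       String.ofList (PySem.List.slice cs (some (k:Int)) none ++
                      PySem.List.slice cs none (some (2 * (k:Int) - (cs.length:Int))))
     else
       String.ofList (PySem.List.slice cs (some (k:Int)) (some (2 * (k:Int)))))
      = String.ofList (canon cs k) := by
  unfold canon
  split_ifs with h
  · -- wrap: 2k > n
    have hw : cs.length < 2 * k := by omega
    rw [PySem.List.slice_from _ (by positivity), PySem.List.slice_to _ (by omega)]
    have h1 : ((k:Int)).toNat = k := by omega
    have h2 : (2 * (k:Int) - (cs.length:Int)).toNat = 2 * k - cs.length := by omega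
    rw [h1, h2, List.take_append]
    have h3 : (cs.drop k).take k = cs.drop k :=
      List.take_of_length_le (by simp; omega)
    have h4 : k - (cs.drop k).length = 2 * k - cs.length := by simp; omega
    rw [h3, h4]
  · -- no wrap: 2k ≤ n
    have hw : 2 * k ≤ cs.length := by omega
    rw [PySem.List.slice_toNat _ (by positivity) (by positivity)]
    have h1 : ((k:Int)).toNat = k := by omega
    have h2 : (2 * (k:Int)).toNat = 2 * k := by omega
    rw [h1, h2, List.take_append]
    have h3 : k - (cs.drop k).length = 0 := by simp; omega
    rw [h3, List.take_zero, List.append_nil, Nat.two_mul, Nat.add_sub_cancel]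

lemma slice_one_elem (cs : List Char) (j : Nat) (hj : j < cs.length) :
    PySem.List.slice cs (some ((j:Nat):Int)) (some (((j:Nat):Int) + 1)) = [cs[j]] := by
  rw [PySem.List.slice_toNat _ (by positivity) (by positivity)]
  have h1 : ((j:Int)).toNat = j := by omega
  have h2 : ((j:Int) + 1).toNat = j + 1 := by omega
  rw [h1, h2, Nat.add_sub_cancel_left]
  exact List.take_one_drop_eq_of_lt_length hj

lemma window_get (cs : List Char) (k q : Nat) (hk : k ≤ cs.length)
    (hn : 0 < cs.length) (hkq : k + q < 2 * cs.length) :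
    (cs.drop k ++ cs)[q]'(by simp; omega) =
      cs[(k + q) % cs.length]'(Nat.mod_lt _ (by omega)) := by
  by_cases hc : q < cs.length - k
  · rw [List.getElem_append_left (by simpa using hc), List.getElem_drop]
    congr 1
    rw [Nat.mod_eq_of_lt (by omega)]
  · rw [List.getElem_append_right (by simp; omega)]
    congr 1
    simp only [List.length_drop]
    rw [Nat.mod_eq_sub_mod (by omega), Nat.mod_eq_of_lt (by omega)]
    omega

lemma stepB_eq (cs : List Char) (out : List String) (k : Nat) (hk : k < cs.length) :
    stepB cs (cs.length:Int) (out, canon cs k) ((k:Nat):Int)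
      = (out ++ [String.ofList (canon cs k)], canon cs (k + 1)) := by
  have hn : 0 < cs.length := by omega
  unfold stepB
  have hj : PySem.Int.mod (2 * ((k:Nat):Int)) (cs.length:Int) = (((2 * k) % cs.length : Nat) : Int) := by
    have := PySem.Int.mod_natCast (2 * k) cs.length
    push_cast at this ⊢
    convert this using 2
  have hk' : PySem.Int.mod (2 * ((k:Nat):Int) + 1) (cs.length:Int) = (((2 * k + 1) % cs.length : Nat) : Int) := by
    have := PySem.Int.mod_natCast (2 * k + 1) cs.length
    push_cast at this ⊢
    convert this using 2
  simp only [hj, hk']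
  rw [slice_one_elem cs _ (Nat.mod_lt _ hn), slice_one_elem cs _ (Nat.mod_lt _ hn),
      PySem.List.slice_from_one]
  congr 1
  -- the message update: (canon k ++ [cs[2k%n]] ++ [cs[(2k+1)%n]]).tail = canon (k+1)
  unfold canon
  have hlen : k + 1 < (cs.drop k ++ cs).length := by simp; omega
  have hw0 : (cs.drop k ++ cs)[k]'(by omega) =
      cs[(2 * k) % cs.length]'(Nat.mod_lt _ hn) := by
    simp only [show 2 * k = k + k from by ring]
    exact window_get cs k k (by omega) hn (by omega)
  have hw1 : (cs.drop k ++ cs)[k + 1]'hlen =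
      cs[(2 * k + 1) % cs.length]'(Nat.mod_lt _ hn) := by
    simp only [show 2 * k + 1 = k + (k + 1) from by ring]
    exact window_get cs k (k + 1) (by omega) hn (by omega)
  have t0 : (cs.drop k ++ cs).take (k + 1) =
      (cs.drop k ++ cs).take k ++ [(cs.drop k ++ cs)[k]'(by omega)] :=
    List.take_succ_eq_append_getElem (by omega)
  have t1 : (cs.drop k ++ cs).take (k + 2) =
      (cs.drop k ++ cs).take (k + 1) ++ [(cs.drop k ++ cs)[k + 1]'hlen] :=
    List.take_succ_eq_append_getElem hlen
  have hcomb : (cs.drop k ++ cs).take k ++ [cs[(2 * k) % cs.length]'(Nat.mod_lt _ hn)] ++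
      [cs[(2 * k + 1) % cs.length]'(Nat.mod_lt _ hn)] = (cs.drop k ++ cs).take (k + 2) := by
    rw [t1, t0, hw0, hw1]
  rw [hcomb]
  -- tail (take (k+2) X) = take (k+1) (tail X) = canon (k+1)
  rw [← List.drop_one, List.drop_take]
  norm_num
  have hd : (cs.drop k ++ cs).tail = cs.drop (k + 1) ++ cs := by
    rw [← List.drop_one, List.drop_append_of_le_length (by simp; omega), List.drop_drop]
  rw [hd]

lemma fold_invariant (cs : List Char) (m : Nat) (hm : m ≤ cs.length) :
    (PySem.List.pyRange 0 ((m:Nat):Int) 1).foldl (stepB cs (cs.length:Int)) ([], []) =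
      ((List.range m).map (fun k => String.ofList (canon cs k)), canon cs m) := by
  induction m with
  | zero => simp [PySem.List.pyRange_one_eq_nil, canon]
  | succ m ih =>
    have hm' : m < cs.length := by omega
    have hcast : (((m+1:Nat)):Int) = ((m:Nat):Int) + 1 := by push_cast; ring
    rw [hcast, PySem.List.pyRange_one_succ_right (by positivity), List.foldl_append,
        ih (by omega)]
    simp only [List.foldl_cons, List.foldl_nil]
    rw [stepB_eq cs _ m hm']
    rw [List.range_succ, List.map_append]
    simp

-- ===== VERDICT =====
theorem msgs_from_alphabet_spec : Claim_equal_msgs_from_alphabet := by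
  intro alphabet _
  unfold Spec_msgs_from_alphabet msgs_from_alphabet msgs_from_alphabet_alt
  set cs := alphabet.toList with hcs
  have hinit : PySem.List.slice cs none (some 0) = ([] : List Char) := by
    simp [PySem.List.slice_to _ (by omega : (0:Int) ≤ 0)]
  rw [hinit, fold_invariant cs cs.length le_rfl]
  rw [PySem.List.pyRange_one]
  simp only [sub_zero, Int.toNat_natCast, List.map_map]
  apply List.map_congr_left
  intro k hk
  have hk' : k < cs.length := List.mem_range.mp hk
  simpa using (msgA_eq_canon cs k hk')
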